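-- pv_equiv track=rewrite | github.com/seraphlnWu/leetcode | codes/max_product_subarray.py | make_slice
-- ===== SOURCE A (Python) =====
-- def make_slice(lst):
--     ''' split list by 0 or minus numbers '''
--     result = []
--     tmp_lst = []
--     for x in lst:
--         if x > 0:
--             tmp_lst.append(x)
--         else:
--             result.append(tmp_lst)
--             tmp_lst = []
--
--     return result
-- ===== SOURCE B (Python) =====
-- def make_slice(lst):
--     ''' split list by 0 or minus numbers '''
--     positions = [i for i, x in enumerate(lst) if not x > 0]
--     result = []
--     start = 0
--     for p in positions:
--         result.append(list(lst[start:p]))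
--         start = p + 1
--     return result
-- ===== Notes on version B (the rewrite author's own statement) =====
-- stated objective: alternative
-- what changed: Instead of accumulating a running segment element by element, B first collects the indices of all non-positive delimiters and then emits one slice lst[start:p] per delimiter, dropping the tail after the last delimiter exactly as A does.
import Mathlib
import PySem

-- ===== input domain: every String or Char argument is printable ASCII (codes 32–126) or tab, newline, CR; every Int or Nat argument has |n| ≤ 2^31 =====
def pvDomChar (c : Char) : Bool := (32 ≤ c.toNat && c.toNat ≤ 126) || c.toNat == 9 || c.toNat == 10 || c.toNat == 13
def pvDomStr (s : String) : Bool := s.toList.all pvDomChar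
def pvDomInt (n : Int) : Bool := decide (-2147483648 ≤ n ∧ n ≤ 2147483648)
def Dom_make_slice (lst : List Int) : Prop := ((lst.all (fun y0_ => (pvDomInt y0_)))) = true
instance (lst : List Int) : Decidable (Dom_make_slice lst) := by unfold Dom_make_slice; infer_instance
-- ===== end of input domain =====

-- B collects the delimiter indices first and emits one slice per delimiter; A grows each segment element by element. Same return value everywhere (alternative decomposition, no speed claim).

-- ===== PORT A =====
def make_slice (lst : List Int) : List (List Int) :=
  (lst.foldl
    (fun (s : List (List Int) × List Int) x =>
      if x > 0 then (s.1, s.2 ++ [x]) else (s.1 ++ [s.2], []))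
    ([], [])).1

-- ===== PORT B =====
def make_slice_alt (lst : List Int) : List (List Int) :=
  let positions : List Int :=
    ((PySem.List.enumerate lst 0).filter (fun p => !(decide (p.2 > 0)))).map (·.1)
  (positions.foldl
    (fun (s : List (List Int) × Int) p =>
      (s.1 ++ [PySem.List.slice lst (some s.2) (some p)], p + 1))
    ([], 0)).1

-- ===== PRECONDITION & SPEC =====
def Spec_make_slice (lst : List Int) (out : List (List Int)) : Prop := out = make_slice_alt lst
instance (lst : List Int) (out : List (List Int)) : Decidable (Spec_make_slice lst out) := by unfold Spec_make_slice; infer_instance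

-- ===== CLAIM (what is proved, stated in full; the proofs are below) =====
def Claim_equal_make_slice : Prop := ∀ (lst : List Int), Dom_make_slice lst → Spec_make_slice lst (make_slice lst)

-- ===== LEMMAS AND PROOFS =====

/-- Recursive characterisation of A's loop: emit `tmp` at each delimiter, drop the tail. -/
def goA : List Int → List Int → List (List Int)
  | [], _ => []
  | x :: xs, tmp => if x > 0 then goA xs (tmp ++ [x]) else tmp :: goA xs []

lemma make_slice_foldl (lst : List Int) :
    ∀ (res : List (List Int)) (tmp : List Int),
      (lst.foldl
        (fun (s : List (List Int) × List Int) x =>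
          if x > 0 then (s.1, s.2 ++ [x]) else (s.1 ++ [s.2], []))
        (res, tmp)).1 = res ++ goA lst tmp := by
  induction lst with
  | nil => intro res tmp; simp [goA]
  | cons x xs ih =>
      intro res tmp
      by_cases h : x > 0
      · simp [List.foldl_cons, h, goA, ih]
      · simp [List.foldl_cons, h, goA, ih]

/-- B's delimiter indices of the suffix, with absolute offset `s`. -/
def posB (xs : List Int) (s : Int) : List Int :=
  ((PySem.List.enumerate xs s).filter (fun p => !(decide (p.2 > 0)))).map (·.1)

lemma posB_cons (x : Int) (xs : List Int) (s : Int) :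
    posB (x :: xs) s =
      if x > 0 then posB xs (s + 1) else s :: posB xs (s + 1) := by
  by_cases h : x > 0 <;> simp [posB, PySem.List.enumerate_cons, h]

lemma drop_succ_of_drop_cons {L xs : List Int} {x : Int} {k : Nat}
    (h : L.drop k = x :: xs) : L.drop (k + 1) = xs := by
  have : L.drop (k + 1) = (L.drop k).drop 1 := by
    rw [List.drop_drop]
  rw [this, h]
  rfl

lemma getElem?_of_drop_cons {L xs : List Int} {x : Int} {k : Nat}
    (h : L.drop k = x :: xs) : L[k]? = some x := by
  have h0 : (L.drop k)[0]? = some x := by rw [h]; rfl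
  simpa using h0

lemma foldB_eq (L : List Int) :
    ∀ (xs : List Int) (k start : Nat) (res : List (List Int)),
      start ≤ k → L.drop k = xs →
      ((posB xs (k : Int)).foldl
        (fun (s : List (List Int) × Int) p =>
          (s.1 ++ [PySem.List.slice L (some s.2) (some p)], p + 1))
        (res, (start : Int))).1
        = res ++ goA xs (((L.drop start).take (k - start))) := by
  intro xs
  induction xs with
  | nil => intro k start res _ _; simp [posB, goA]
  | cons x xs ih =>
      intro k start res hsk hdrop
      rw [posB_cons]
      by_cases h : x > 0
      · simp only [h, if_pos]
        have hx : L[k]? = some x := getElem?_of_drop_cons hdrop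
        have htake : (L.drop start).take (k + 1 - start)
            = (L.drop start).take (k - start) ++ [x] := by
          have hk : k + 1 - start = (k - start) + 1 := by omega
          rw [hk, List.take_add_one]
          have : (L.drop start)[k - start]? = some x := by
            rw [List.getElem?_drop]
            have : start + (k - start) = k := by omega
            rw [this]; exact hx
          rw [this]; rfl
        have hk1 : ((k : Int) + 1) = ((k + 1 : Nat) : Int) := by push_cast; ring
        rw [hk1]
        rw [ih (k + 1) start res (by omega) (drop_succ_of_drop_cons hdrop)]
        simp [goA, h, htake]
      · simp only [h, if_neg, not_false_iff, List.foldl_cons]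
        have hslice : PySem.List.slice L (some ((start : Nat) : Int)) (some ((k : Nat) : Int))
            = (L.drop start).take (k - start) := PySem.List.slice_natCast L start k
        have hk1 : ((k : Int) + 1) = ((k + 1 : Nat) : Int) := by push_cast; ring
        rw [hslice, hk1]
        rw [ih (k + 1) (k + 1) (res ++ [(L.drop start).take (k - start)]) (by omega)
          (drop_succ_of_drop_cons hdrop)]
        simp [goA, h]

-- ===== VERDICT (by name: the statement is the Claim_ definition above) =====
theorem make_slice_spec : Claim_equal_make_slice := by
  intro lst _
  show make_slice lst = make_slice_alt lst
  unfold make_slice make_slice_alt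
  rw [make_slice_foldl lst [] []]
  have := foldB_eq lst lst 0 0 [] (le_refl 0) (by simp)
  simp only [Nat.cast_zero] at this
  rw [show ((PySem.List.enumerate lst 0).filter (fun p => !(decide (p.2 > 0)))).map (·.1)
      = posB lst (0 : Int) from rfl]
  rw [this]
  simp
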